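-- pv_equiv track=rewrite | github.com/Ton-IO-S3r/Practice_Exercises | python/back_odoo.py | countVowelsValue
-- ===== SOURCE A (Python) =====
-- def countVowelsValue(phrase):
--   vowels_arr=['a','e','i','o','u']
--   counter=0
--
--   #Change phrase to lowercase
--   phrase=phrase.lower()
--
--   #create a list with vowels found in phrase
--   phrase_vowels = [i for i in phrase if i in vowels_arr]
--
--   #add to counter each vowel's value from vowels list and return result
--   for vowel in phrase_vowels:
--     counter += vowels_arr.index(vowel)+1
--   return counter
-- ===== SOURCE B (Python) =====
-- def countVowelsValue(phrase):
--     # One counting pass into a dict, then a 5-term weighted sum over the vowels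
--     # (instead of A's filter pass + per-vowel list.index lookup inside the loop).
--     counts = {}
--     for ch in phrase.lower():
--         counts[ch] = counts.get(ch, 0) + 1
--     return sum(value * counts.get(v, 0) for value, v in enumerate('aeiou', 1))
-- ===== Notes on version B (the rewrite author's own statement) =====
-- stated objective: alternative
-- what changed: Replaced A's filter-then-fold with per-vowel list.index lookups by a single histogram pass into a dict followed by a fixed 5-term weighted sum over the vowels.
import Mathlib
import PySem

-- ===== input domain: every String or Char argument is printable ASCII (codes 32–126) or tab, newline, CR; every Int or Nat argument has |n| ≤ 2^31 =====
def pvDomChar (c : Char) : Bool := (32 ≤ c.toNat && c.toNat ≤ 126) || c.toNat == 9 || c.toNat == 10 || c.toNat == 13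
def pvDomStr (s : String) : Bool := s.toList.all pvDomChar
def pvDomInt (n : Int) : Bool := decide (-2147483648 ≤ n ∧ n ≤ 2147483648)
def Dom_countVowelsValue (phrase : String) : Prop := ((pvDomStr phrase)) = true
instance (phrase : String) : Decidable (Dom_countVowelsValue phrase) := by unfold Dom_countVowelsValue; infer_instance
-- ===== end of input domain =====

-- B replaces A's filter-then-fold (with a list.index lookup per vowel) by one histogram
-- pass into a dict plus a fixed 5-term weighted sum over the vowels (alternative, same cost).


-- ===== PORT A =====
def countVowelsValue (phrase : String) : Int :=
  let vowels_arr : List Char := ['a', 'e', 'i', 'o', 'u']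
  let counter : Int := 0
  let phrase' := PySem.Str.lower phrase
  let phrase_vowels := phrase'.toList.filter (fun i => vowels_arr.contains i)
  -- 'vowels_arr.index(vowel) + 1': every element of phrase_vowels is in vowels_arr,
  -- so Python's list.index never raises here; getD 0 is never the default.
  phrase_vowels.foldl
    (fun counter vowel => counter + (((PySem.List.index? vowels_arr vowel).getD 0 : Int) + 1))
    counter

-- ===== PORT B =====
def countVowelsValue_alt (phrase : String) : Int :=
  let low := PySem.Chars.lower phrase.toList
  let counts : PySem.Dict Char Int :=
    low.foldl (fun d ch => d.insert ch (d.getD ch 0 + 1)) PySem.Dict.empty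
  (([(1, 'a'), (2, 'e'), (3, 'i'), (4, 'o'), (5, 'u')] : List (Int × Char)).foldl
    (fun acc p => acc + p.1 * counts.getD p.2 0) 0)

-- ===== PRECONDITION & SPEC =====
def Spec_countVowelsValue (phrase : String) (out : Int) : Prop := out = countVowelsValue_alt phrase
instance (phrase : String) (out : Int) : Decidable (Spec_countVowelsValue phrase out) := by unfold Spec_countVowelsValue; infer_instance

-- ===== CLAIM (what is proved, stated in full; the proofs are below) =====
def Claim_equal_countVowelsValue : Prop := ∀ (phrase : String), Dom_countVowelsValue phrase → Spec_countVowelsValue phrase (countVowelsValue phrase)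

-- ===== LEMMAS AND PROOFS =====

-- per-character vowel value: a=1, e=2, i=3, o=4, u=5, other=0
def pvVal (c : Char) : Int :=
  if c = 'a' then 1 else if c = 'e' then 2 else if c = 'i' then 3
  else if c = 'o' then 4 else if c = 'u' then 5 else 0

lemma pvA_fold (l : List Char) (acc : Int) :
    (l.filter (fun i => (['a','e','i','o','u'] : List Char).contains i)).foldl
      (fun counter vowel => counter + (((PySem.List.index? (['a','e','i','o','u'] : List Char) vowel).getD 0 : Int) + 1))
      acc = acc + (l.map pvVal).sum := by
  induction l generalizing acc with
  | nil => simp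
  | cons c t ih =>
    by_cases h : (['a','e','i','o','u'] : List Char).contains c
    · have hv : ((PySem.List.index? (['a','e','i','o','u'] : List Char) c).getD 0 : Int) + 1 = pvVal c := by
        rcases (by simpa using h : c = 'a' ∨ c = 'e' ∨ c = 'i' ∨ c = 'o' ∨ c = 'u') with h|h|h|h|h <;>
          subst h <;> decide
      rw [List.filter_cons_of_pos h, List.foldl_cons, ih]
      simp only [List.map_cons, List.sum_cons, ← hv]
      ring
    · have hv : pvVal c = 0 := by
        obtain ⟨h1, h2, h3, h4, h5⟩ : ¬ c = 'a' ∧ ¬ c = 'e' ∧ ¬ c = 'i' ∧ ¬ c = 'o' ∧ ¬ c = 'u' := by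
          simpa using h
        simp [pvVal, h1, h2, h3, h4, h5]
      rw [List.filter_cons_of_neg h, ih]
      simp only [List.map_cons, List.sum_cons, hv]
      ring

lemma pvSum_counts (l : List Char) :
    (l.map pvVal).sum =
      1 * (l.count 'a' : Int) + 2 * (l.count 'e' : Int) + 3 * (l.count 'i' : Int)
        + 4 * (l.count 'o' : Int) + 5 * (l.count 'u' : Int) := by
  induction l with
  | nil => simp
  | cons c t ih =>
    simp only [List.map_cons, List.sum_cons, List.count_cons, ih]
    by_cases h1 : c = 'a' <;> by_cases h2 : c = 'e' <;> by_cases h3 : c = 'i' <;>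
      by_cases h4 : c = 'o' <;> by_cases h5 : c = 'u' <;>
      simp_all [pvVal] <;> ring

-- ===== VERDICT (by name: the statement is the Claim_ definition above) =====
theorem countVowelsValue_spec : Claim_equal_countVowelsValue := by
  intro phrase _
  show countVowelsValue phrase = countVowelsValue_alt phrase
  unfold countVowelsValue countVowelsValue_alt
  simp only [PySem.Str.toList_lower]
  rw [pvA_fold, pvSum_counts]
  simp only [List.foldl_cons, List.foldl_nil,
    PySem.Dict.foldl_insert_getD_add_one_eq_counter, PySem.Dict.getD_counter]
  ring
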